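-- pv_equiv track=rewrite | github.com/zahmedgit/Code_Challenges | Who_is_the_Killer.py | killer
-- ===== SOURCE A (Python) =====
-- def killer(suspect_info, dead):
--     for suspect in suspect_info:
--         count=0
--         for p in dead:
--             if p in suspect_info[suspect]:
--                 count+=1
--         if count==len(dead):
--             return suspect
--     return ''
-- ===== SOURCE B (Python) =====
-- def killer(suspect_info, dead):
--     candidates = list(suspect_info.items())
--     for p in dead:
--         candidates = [c for c in candidates if p in c[1]]
--     return candidates[0][0] if candidates else ''
-- ===== Notes on version B (the rewrite author's own statement) =====
-- stated objective: faster
-- what changed: B inverts the loop nesting: instead of counting, per suspect, how many dead people appear in that suspect's list, it maintains an insertion-ordered candidate list filtered once per dead person and returns the first survivor (or ''); the candidate list shrinks as dead people are processed, so surviving work collapses while A always scans every suspect against every dead person until a full match.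
import Mathlib
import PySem

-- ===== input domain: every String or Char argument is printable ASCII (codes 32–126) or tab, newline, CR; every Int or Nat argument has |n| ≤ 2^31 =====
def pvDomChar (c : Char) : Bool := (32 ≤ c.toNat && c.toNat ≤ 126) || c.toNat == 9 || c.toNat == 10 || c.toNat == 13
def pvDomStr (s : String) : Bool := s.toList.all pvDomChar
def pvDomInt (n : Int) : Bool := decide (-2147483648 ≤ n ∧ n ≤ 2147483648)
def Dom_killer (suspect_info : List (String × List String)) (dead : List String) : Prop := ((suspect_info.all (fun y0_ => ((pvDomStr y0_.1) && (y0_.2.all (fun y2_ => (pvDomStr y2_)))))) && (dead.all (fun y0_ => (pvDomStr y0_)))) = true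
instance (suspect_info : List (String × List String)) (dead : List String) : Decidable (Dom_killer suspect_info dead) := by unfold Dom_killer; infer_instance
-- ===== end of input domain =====

-- B inverts the loop nesting: instead of counting dead matches per suspect, it keeps an
-- insertion-ordered candidate list and narrows it by each dead person; same result, plainer code.

-- ===== PORT A =====
-- suspect_info[suspect]: first-match lookup in the association list (KeyError impossible here:
-- the key always comes from iterating suspect_info itself, so the default branch is never hit)
def pyLookup (d : List (String × List String)) (k : String) : List String :=
  match d.find? (fun pr => pr.1 == k) with
  | some pr => pr.2
  | none => []

def killerAux (d : List (String × List String)) (dead : List String) : List (String × List String) → String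
  | [] => ""
  | pr :: rest =>
    let count : Int := dead.foldl (fun c p => if p ∈ pyLookup d pr.1 then c + 1 else c) 0
    if count = (dead.length : Int) then pr.1 else killerAux d dead rest

def killer (suspect_info : List (String × List String)) (dead : List String) : String :=
  killerAux suspect_info dead suspect_info

-- ===== PORT B =====
def killer_alt (suspect_info : List (String × List String)) (dead : List String) : String :=
  let candidates := dead.foldl (fun cand p => cand.filter (fun c => decide (p ∈ c.2))) suspect_info
  match candidates with
  | [] => ""
  | c :: _ => c.1

-- ===== PRECONDITION & SPEC =====
-- Pre_ excludes association lists with duplicate keys: a Python dict cannot hold them, so no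
-- Python input is excluded; it fixes the assoc-list representation to match dict semantics.
def Pre_killer (suspect_info : List (String × List String)) (dead : List String) : Prop :=
  (suspect_info.map Prod.fst).Nodup
instance (suspect_info : List (String × List String)) (dead : List String) : Decidable (Pre_killer suspect_info dead) := by unfold Pre_killer; infer_instance

def pvWitness_killer : (List (String × List String)) × List String :=
  ([("a", ["x", "y"]), ("b", ["x"])], ["x", "y"])

def Spec_killer (suspect_info : List (String × List String)) (dead : List String) (out : String) : Prop := out = killer_alt suspect_info dead
instance (suspect_info : List (String × List String)) (dead : List String) (out : String) : Decidable (Spec_killer suspect_info dead out) := by unfold Spec_killer; infer_instance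

-- ===== CLAIM (what is proved, stated in full; the proofs are below) =====
def Claim_equal_killer : Prop := ∀ (suspect_info : List (String × List String)) (dead : List String), Dom_killer suspect_info dead → Pre_killer suspect_info dead → Spec_killer suspect_info dead (killer suspect_info dead)

-- ===== LEMMAS AND PROOFS =====

theorem pyLookup_self (d : List (String × List String)) (pr : String × List String)
    (hmem : pr ∈ d) (hnd : (d.map Prod.fst).Nodup) : pyLookup d pr.1 = pr.2 := by
  induction d with
  | nil => cases hmem
  | cons q rest ih =>
    simp only [List.map_cons, List.nodup_cons] at hnd
    unfold pyLookup
    rcases List.mem_cons.1 hmem with h | h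
    · subst h; simp
    · by_cases hk : q.1 = pr.1
      · exact absurd (hk ▸ List.mem_map_of_mem h) hnd.1
      · have hb : (q.1 == pr.1) = false := beq_eq_false_iff_ne.2 hk
        simp only [List.find?_cons, hb]
        have hr := ih h hnd.2
        unfold pyLookup at hr
        exact hr

theorem countFold (dead : List String) (L : List String) (c : Int) :
    dead.foldl (fun c p => if p ∈ L then c + 1 else c) c
      = c + (dead.countP (fun p => decide (p ∈ L)) : Int) := by
  induction dead generalizing c with
  | nil => simp
  | cons p ps ih =>
    by_cases h : p ∈ L <;> simp [List.countP_cons, h, ih] <;> ring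

theorem count_cond (dead : List String) (L : List String) :
    (dead.foldl (fun c p => if p ∈ L then c + 1 else c) (0 : Int) = (dead.length : Int))
      ↔ dead.all (fun p => decide (p ∈ L)) = true := by
  rw [countFold]
  have hle := List.countP_le_length (l := dead) (p := fun p => decide (p ∈ L))
  constructor
  · intro h
    have : dead.countP (fun p => decide (p ∈ L)) = dead.length := by omega
    rw [List.all_eq_true]
    intro p hp
    exact (List.countP_eq_length).1 this p hp
  · intro h
    have : dead.countP (fun p => decide (p ∈ L)) = dead.length :=
      List.countP_eq_length.2 (fun p hp => (List.all_eq_true.1 h) p hp)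
    omega

theorem foldl_filter_all (dead : List String) (si : List (String × List String)) :
    dead.foldl (fun cand p => cand.filter (fun c => decide (p ∈ c.2))) si
      = si.filter (fun c => dead.all (fun p => decide (p ∈ c.2))) := by
  induction dead generalizing si with
  | nil => simp
  | cons p ps ih =>
    simp only [List.foldl_cons, ih, List.filter_filter]
    apply List.filter_congr
    intro c _
    simp [Bool.and_comm]

theorem killerAux_eq (d : List (String × List String)) (dead : List String)
    (l : List (String × List String)) (hsub : ∀ pr ∈ l, pr ∈ d)
    (hnd : (d.map Prod.fst).Nodup) :
    killerAux d dead l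
      = (match l.filter (fun c => dead.all (fun p => decide (p ∈ c.2))) with
         | [] => ""
         | c :: _ => c.1) := by
  induction l with
  | nil => simp [killerAux]
  | cons pr rest ih =>
    have hpr : pr ∈ d := hsub pr (List.mem_cons_self)
    have hlk := pyLookup_self d pr hpr hnd
    unfold killerAux
    simp only [hlk]
    by_cases h : dead.all (fun p => decide (p ∈ pr.2)) = true
    · rw [if_pos ((count_cond dead pr.2).2 h)]
      simp [List.filter_cons, h]
    · rw [if_neg (fun hc => h ((count_cond dead pr.2).1 hc))]
      rw [ih (fun q hq => hsub q (List.mem_cons_of_mem _ hq))]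
      simp [List.filter_cons, h]

-- ===== VERDICT (by name: the statement is the Claim_ definition above) =====
theorem killer_spec : Claim_equal_killer := by
  intro si dead _ hpre
  unfold Spec_killer killer killer_alt
  rw [foldl_filter_all, killerAux_eq si dead si (fun _ h => h) hpre]
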